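-- pv_equiv track=rewrite | github.com/PerssonRickard/AdventOfCode2021 | day20/day20.py | getIndexFrom3Times3Grid
-- ===== SOURCE A (Python) =====
-- def binaryToDec(binaryNumber):
--     dec = 0
--     powerOfTwo = 1
--
--     for i in range(len(binaryNumber)-1, -1, -1):
--         dec = dec + binaryNumber[i]*powerOfTwo
--         powerOfTwo = powerOfTwo*2
--
--     return dec
--
-- def getIndexFrom3Times3Grid(x, y, image):
--     binaryNumber = [None for i in range(9)]
--
--     # Iterate over the 3x3 grid centered at x, y
--     i = 0
--     for yOffset in range(-1, 2):
--         for xOffset in range(-1, 2):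
--             binaryNumber[i] = image[y + yOffset][x + xOffset]
--             i = i + 1
--
--     dec = binaryToDec(binaryNumber)
--
--     return dec
-- ===== SOURCE B (Python) =====
-- def getIndexFrom3Times3Grid(x, y, image):
--     # Horner's method in one fused pass: no intermediate 9-element list,
--     # no separate binary-to-decimal loop.
--     dec = 0
--     for yOffset in range(-1, 2):
--         row = image[y + yOffset]
--         for xOffset in range(-1, 2):
--             dec = dec * 2 + row[x + xOffset]
--     return dec
-- ===== Notes on version B (the rewrite author's own statement) =====
-- stated objective: simpler
-- what changed: Replaces the intermediate 9-element list plus a second base-conversion loop with a single fused pass that accumulates the index by Horner's method (dec = dec*2 + cell).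
import Mathlib
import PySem

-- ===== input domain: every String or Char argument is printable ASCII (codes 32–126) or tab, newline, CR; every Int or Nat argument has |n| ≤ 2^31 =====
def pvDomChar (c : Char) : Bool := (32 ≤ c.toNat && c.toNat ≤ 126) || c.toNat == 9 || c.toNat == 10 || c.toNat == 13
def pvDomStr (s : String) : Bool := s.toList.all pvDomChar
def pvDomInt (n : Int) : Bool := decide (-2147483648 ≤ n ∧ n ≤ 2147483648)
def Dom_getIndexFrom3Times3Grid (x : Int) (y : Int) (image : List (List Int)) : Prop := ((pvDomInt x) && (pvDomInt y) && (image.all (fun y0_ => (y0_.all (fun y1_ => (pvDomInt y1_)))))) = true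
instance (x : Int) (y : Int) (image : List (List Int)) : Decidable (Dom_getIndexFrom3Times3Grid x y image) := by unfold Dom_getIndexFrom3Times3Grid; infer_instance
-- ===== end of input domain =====

-- B replaces A's intermediate 9-element list and separate binary-to-decimal loop with one
-- fused Horner-accumulator pass; objective: simpler. Return values agree on all of Pre_.

-- ===== PORT A =====
-- helper: Python binaryToDec — loop i from len-1 down to 0, dec += b[i]*powerOfTwo, powerOfTwo *= 2.
-- b is a list of Option Int (modelling the initial [None]*9); inside A every slot is assigned
-- before binaryToDec runs and every index is in range, so the getD defaults are never observed.
def binaryToDecPort (b : List (Option Int)) : Int :=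
  (PySem.List.pyRange ((b.length : Int) - 1) (-1) (-1)).foldl
    (fun (st : Int × Int) i =>
      (st.1 + ((PySem.List.pyGet? b i).getD none).getD 0 * st.2, st.2 * 2)) (0, 1) |>.1

def getIndexFrom3Times3Grid (x : Int) (y : Int) (image : List (List Int)) : Int :=
  -- binaryNumber = [None for i in range(9)]; then nested loops assign binaryNumber[i] and i += 1
  let init : List (Option Int) := List.replicate 9 none
  let st :=
    (PySem.List.pyRange (-1) 2 1).foldl (fun (st : List (Option Int) × Nat) yOffset =>
      (PySem.List.pyRange (-1) 2 1).foldl (fun st xOffset =>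
        let cell := (PySem.List.pyGet?
          ((PySem.List.pyGet? image (y + yOffset)).getD []) (x + xOffset)).getD 0
        (st.1.set st.2 (some cell), st.2 + 1)) st) (init, 0)
  binaryToDecPort st.1

-- ===== PORT B =====
def getIndexFrom3Times3Grid_alt (x : Int) (y : Int) (image : List (List Int)) : Int :=
  (PySem.List.pyRange (-1) 2 1).foldl (fun dec yOffset =>
    let row := (PySem.List.pyGet? image (y + yOffset)).getD []
    (PySem.List.pyRange (-1) 2 1).foldl (fun dec xOffset =>
      dec * 2 + (PySem.List.pyGet? row (x + xOffset)).getD 0) dec) 0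

-- ===== PRECONDITION & SPEC =====
-- Pre_: exactly the inputs where all nine accesses image[y+dy][x+dx] succeed (Python raises
-- IndexError otherwise; pyGet? honours Python's negative-index rule).
def Pre_getIndexFrom3Times3Grid (x : Int) (y : Int) (image : List (List Int)) : Prop :=
  ∀ dy ∈ ([-1, 0, 1] : List Int), ∀ dx ∈ ([-1, 0, 1] : List Int),
    ((PySem.List.pyGet? image (y + dy)).bind
      (fun row => PySem.List.pyGet? row (x + dx))).isSome = true
instance (x : Int) (y : Int) (image : List (List Int)) : Decidable (Pre_getIndexFrom3Times3Grid x y image) := by unfold Pre_getIndexFrom3Times3Grid; infer_instance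

def pvWitness_getIndexFrom3Times3Grid : Int × Int × List (List Int) :=
  (1, 1, [[1, 0, 1], [0, 1, 0], [1, 1, 0]])

def Spec_getIndexFrom3Times3Grid (x : Int) (y : Int) (image : List (List Int)) (out : Int) : Prop := out = getIndexFrom3Times3Grid_alt x y image
instance (x : Int) (y : Int) (image : List (List Int)) (out : Int) : Decidable (Spec_getIndexFrom3Times3Grid x y image out) := by unfold Spec_getIndexFrom3Times3Grid; infer_instance

-- ===== CLAIM (what is proved, stated in full; the proofs are below) =====
def Claim_equal_getIndexFrom3Times3Grid : Prop := ∀ (x : Int) (y : Int) (image : List (List Int)), Dom_getIndexFrom3Times3Grid x y image → Pre_getIndexFrom3Times3Grid x y image → Spec_getIndexFrom3Times3Grid x y image (getIndexFrom3Times3Grid x y image)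

-- ===== LEMMAS AND PROOFS =====

lemma pyRange_m1_2 : PySem.List.pyRange (-1) 2 1 = [-1, 0, 1] := by decide

-- ===== VERDICT (by name: the statement is the Claim_ definition above) =====
theorem getIndexFrom3Times3Grid_spec : Claim_equal_getIndexFrom3Times3Grid := by
  intro x y image _ hpre
  obtain ⟨r0, hr0⟩ := Option.isSome_iff_exists.mp
    (Option.isSome_of_isSome_bind (hpre (-1) (by simp) (-1) (by simp)))
  obtain ⟨r1, hr1⟩ := Option.isSome_iff_exists.mp
    (Option.isSome_of_isSome_bind (hpre 0 (by simp) (-1) (by simp)))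
  obtain ⟨r2, hr2⟩ := Option.isSome_iff_exists.mp
    (Option.isSome_of_isSome_bind (hpre 1 (by simp) (-1) (by simp)))
  have hr1' : PySem.List.pyGet? image y = some r1 := by simpa using hr1
  unfold Spec_getIndexFrom3Times3Grid getIndexFrom3Times3Grid getIndexFrom3Times3Grid_alt binaryToDecPort
  simp [pyRange_m1_2, hr0, hr1', hr2, List.foldl, List.replicate, List.set]
  rw [show PySem.List.pyRange 8 (-1) (-1) = [8, 7, 6, 5, 4, 3, 2, 1, 0] from by decide]
  simp [List.foldl, PySem.List.pyGet?, PySem.List.pyIdx?]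
  ring
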